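-- pv_equiv track=rewrite | github.com/PGrad-Icarus/AdventOfCode | Day1Problem.py | firstPosToBasement
-- ===== SOURCE A (Python) =====
-- def firstPosToBasement(string):
-- 	floor = 0
-- 	pos = 0
-- 	length = len(string)
-- 	while(floor != -1 and pos != length):
-- 		char = string[pos]
-- 		if(char == "("):
-- 			floor += 1
-- 		else:
-- 			floor -= 1
-- 		pos += 1
-- 	return pos
-- ===== SOURCE B (Python) =====
-- def firstPosToBasement(string):
--     # Phase 1: build the running prefix-balance table.
--     sums = []
--     total = 0
--     for c in string:
--         total += 1 if c == "(" else -1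
--         sums.append(total)
--     # Phase 2: search the table for the first balance of -1.
--     for i, s in enumerate(sums):
--         if s == -1:
--             return i + 1
--     return len(string)
-- ===== Notes on version B (the rewrite author's own statement) =====
-- stated objective: alternative
-- what changed: Replaces the fused stop-early counter loop by two visible phases: build the full prefix-balance table, then search it for the first -1 (index+1, else len).
import Mathlib
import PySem

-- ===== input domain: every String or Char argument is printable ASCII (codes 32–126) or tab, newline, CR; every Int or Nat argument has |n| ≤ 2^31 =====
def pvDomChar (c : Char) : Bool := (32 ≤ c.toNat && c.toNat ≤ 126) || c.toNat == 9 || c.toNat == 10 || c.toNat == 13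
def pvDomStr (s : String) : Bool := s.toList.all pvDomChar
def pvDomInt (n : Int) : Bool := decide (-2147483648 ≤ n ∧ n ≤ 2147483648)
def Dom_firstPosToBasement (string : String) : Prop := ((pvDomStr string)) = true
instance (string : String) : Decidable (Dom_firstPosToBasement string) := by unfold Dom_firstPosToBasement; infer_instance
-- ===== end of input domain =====

-- B rebuilds the answer in two phases (prefix-balance table, then first -1 search) instead of A's fused stop-early counter loop; alternative decomposition, same cost.


-- ===== PORT A =====
-- while(floor != -1 and pos != length): pos ≠ length ↔ remaining chars nonempty
def pvLoopA : List Char → Int → Int → Int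
  | [], _, pos => pos
  | c :: rest, floor, pos =>
      if floor = -1 then pos
      else pvLoopA rest (if c = '(' then floor + 1 else floor - 1) (pos + 1)

def firstPosToBasement (string : String) : Int :=
  pvLoopA string.toList 0 0

-- ===== PORT B =====
-- phase 1: the running prefix-balance table (total += ±1; sums.append(total))
def pvSumsB : List Char → Int → List Int
  | [], _ => []
  | c :: rest, total =>
      let total' := total + (if c = '(' then 1 else -1)
      total' :: pvSumsB rest total'

-- phase 2: first index whose balance is -1
def pvFindB : List Int → Option Nat
  | [] => none
  | s :: rest => if s = -1 then some 0 else (pvFindB rest).map (· + 1)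

def firstPosToBasement_alt (string : String) : Int :=
  match pvFindB (pvSumsB string.toList 0) with
  | some i => (i : Int) + 1
  | none => (string.toList.length : Int)

-- ===== PRECONDITION & SPEC =====
def Spec_firstPosToBasement (string : String) (out : Int) : Prop := out = firstPosToBasement_alt string
instance (string : String) (out : Int) : Decidable (Spec_firstPosToBasement string out) := by unfold Spec_firstPosToBasement; infer_instance

-- ===== CLAIM (what is proved, stated in full; the proofs are below) =====
def Claim_equal_firstPosToBasement : Prop := ∀ (string : String), Dom_firstPosToBasement string → Spec_firstPosToBasement string (firstPosToBasement string)

-- ===== LEMMAS AND PROOFS =====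
theorem pvLoopA_stuck (cs : List Char) (pos : Int) : pvLoopA cs (-1) pos = pos := by
  cases cs <;> simp [pvLoopA]

theorem pvLoop_eq (cs : List Char) (floor pos : Int) (h : floor ≠ -1) :
    pvLoopA cs floor pos =
      pos + (match pvFindB (pvSumsB cs floor) with
             | some i => (i : Int) + 1
             | none => (cs.length : Int)) := by
  induction cs generalizing floor pos with
  | nil => simp [pvLoopA, pvSumsB, pvFindB]
  | cons c rest ih =>
      simp only [pvLoopA, if_neg h, pvSumsB, pvFindB]
      set f' : Int := floor + (if c = '(' then 1 else -1) with hf'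
      have hstep : (if c = '(' then floor + 1 else floor - 1) = f' := by
        rw [hf']; split <;> ring
      rw [hstep]
      by_cases hneg : f' = -1
      · rw [if_pos hneg, hneg, pvLoopA_stuck]
        simp
      · rw [if_neg hneg]
        rw [ih f' (pos + 1) hneg]
        cases hfind : pvFindB (pvSumsB rest f') with
        | none => simp; ring
        | some i => simp; ring

-- ===== VERDICT (by name: the statement is the Claim_ definition above) =====
theorem firstPosToBasement_spec : Claim_equal_firstPosToBasement := by
  intro s _
  unfold Spec_firstPosToBasement firstPosToBasement firstPosToBasement_alt
  rw [pvLoop_eq s.toList 0 0 (by norm_num)]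
  cases pvFindB (pvSumsB s.toList 0) <;> simp
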